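-- pv_equiv track=rewrite | github.com/GabrielCESanto/Analise-de-Inscritos---TCC | ProgramaFinal.py | gerar_edicoes
-- ===== SOURCE A (Python) =====
-- def gerar_edicoes(ano_inicial, semestre_inicial, ano_final, semestre_final):
--     edicoes = []
--     for ano in range(ano_inicial, ano_final + 1):
--         for semestre in range(1, 3):
--             if ano == ano_inicial and semestre < semestre_inicial:
--                 continue
--             if ano == ano_final and semestre > semestre_final:
--                 continue
--             edicoes.append((ano, semestre))
--     return edicoes
-- ===== SOURCE B (Python) =====
-- def gerar_edicoes(ano_inicial, semestre_inicial, ano_final, semestre_final):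
--     first = (ano_inicial, semestre_inicial)
--     last = (ano_final, semestre_final)
--     todas = ((i // 2, i % 2 + 1) for i in range(ano_inicial * 2, ano_final * 2 + 2))
--     return [ed for ed in todas if first <= ed <= last]
-- ===== Notes on version B (the rewrite author's own statement) =====
-- stated objective: alternative
-- what changed: Replaces the two nested loops with continue-guards by one flat pass over a linear edition index (decoded as (i//2, i%2+1)) filtered by lexicographic tuple bounds first <= ed <= last.
import Mathlib
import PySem

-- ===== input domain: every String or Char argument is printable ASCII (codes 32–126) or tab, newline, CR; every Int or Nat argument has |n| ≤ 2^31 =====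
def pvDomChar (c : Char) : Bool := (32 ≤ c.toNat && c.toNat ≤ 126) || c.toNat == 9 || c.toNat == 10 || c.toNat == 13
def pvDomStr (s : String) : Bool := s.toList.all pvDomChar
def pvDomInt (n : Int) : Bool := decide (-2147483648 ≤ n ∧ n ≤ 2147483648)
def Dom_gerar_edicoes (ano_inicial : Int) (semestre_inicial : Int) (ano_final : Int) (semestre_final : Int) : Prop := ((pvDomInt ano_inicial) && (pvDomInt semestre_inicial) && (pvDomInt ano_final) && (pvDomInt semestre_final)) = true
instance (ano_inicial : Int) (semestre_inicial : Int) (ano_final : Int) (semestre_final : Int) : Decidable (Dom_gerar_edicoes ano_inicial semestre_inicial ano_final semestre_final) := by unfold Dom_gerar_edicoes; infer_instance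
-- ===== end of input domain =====

-- B flattens the nested loops into one pass over a linear edition index filtered by lexicographic tuple bounds; same cost, different decomposition.

-- ===== PORT A =====
def gerar_edicoes (ano_inicial : Int) (semestre_inicial : Int) (ano_final : Int) (semestre_final : Int) : List (Int × Int) :=
  (PySem.List.pyRange ano_inicial (ano_final + 1) 1).foldl (fun edicoes ano =>
    (PySem.List.pyRange 1 3 1).foldl (fun ed semestre =>
      if ano = ano_inicial ∧ semestre < semestre_inicial then ed
      else if ano = ano_final ∧ semestre > semestre_final then ed
      else ed ++ [(ano, semestre)]) edicoes) []

-- ===== PORT B =====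
/-- Python tuple comparison `a <= b` on pairs of ints (lexicographic). -/
def pvLexLe (a b : Int × Int) : Bool := a.1 < b.1 || (a.1 == b.1 && a.2 ≤ b.2)

def gerar_edicoes_alt (ano_inicial : Int) (semestre_inicial : Int) (ano_final : Int) (semestre_final : Int) : List (Int × Int) :=
  let first := (ano_inicial, semestre_inicial)
  let last := (ano_final, semestre_final)
  let todas := (PySem.List.pyRange (ano_inicial * 2) (ano_final * 2 + 2) 1).map
    (fun i => (PySem.Int.floordiv i 2, PySem.Int.mod i 2 + 1))
  todas.filter (fun ed => pvLexLe first ed && pvLexLe ed last)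

-- ===== PRECONDITION & SPEC =====
def Spec_gerar_edicoes (ano_inicial : Int) (semestre_inicial : Int) (ano_final : Int) (semestre_final : Int) (out : List (Int × Int)) : Prop := out = gerar_edicoes_alt ano_inicial semestre_inicial ano_final semestre_final
instance (ano_inicial : Int) (semestre_inicial : Int) (ano_final : Int) (semestre_final : Int) (out : List (Int × Int)) : Decidable (Spec_gerar_edicoes ano_inicial semestre_inicial ano_final semestre_final out) := by unfold Spec_gerar_edicoes; infer_instance

-- ===== CLAIM (what is proved, stated in full; the proofs are below) =====
def Claim_equal_gerar_edicoes : Prop := ∀ (ano_inicial : Int) (semestre_inicial : Int) (ano_final : Int) (semestre_final : Int), Dom_gerar_edicoes ano_inicial semestre_inicial ano_final semestre_final → Spec_gerar_edicoes ano_inicial semestre_inicial ano_final semestre_final (gerar_edicoes ano_inicial semestre_inicial ano_final semestre_final)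

-- ===== LEMMAS AND PROOFS =====

/-- the decode function of B's port -/
def pvF (idx : Int) : Int × Int := (PySem.Int.floordiv idx 2, PySem.Int.mod idx 2 + 1)

/-- the editions A's inner loop contributes for one year `ano` -/
def pvYr (ai si af sf ano : Int) : List (Int × Int) :=
  (if ano = ai ∧ (1:Int) < si then [] else if ano = af ∧ (1:Int) > sf then [] else [(ano, 1)]) ++
  (if ano = ai ∧ (2:Int) < si then [] else if ano = af ∧ (2:Int) > sf then [] else [(ano, 2)])

lemma pvF_even (a : Int) : pvF (a * 2) = (a, 1) := by
  have hd : PySem.Int.floordiv (a * 2) 2 = a :=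
    (PySem.Int.floordiv_eq_iff_of_pos (by norm_num)).mpr (by constructor <;> nlinarith)
  have hm := PySem.Int.floordiv_mul_add_mod (a * 2) 2
  rw [hd] at hm
  unfold pvF
  rw [hd, show PySem.Int.mod (a * 2) 2 = 0 by omega]
  norm_num

lemma pvF_odd (a : Int) : pvF (a * 2 + 1) = (a, 2) := by
  have hd : PySem.Int.floordiv (a * 2 + 1) 2 = a :=
    (PySem.Int.floordiv_eq_iff_of_pos (by norm_num)).mpr (by constructor <;> nlinarith)
  have hm := PySem.Int.floordiv_mul_add_mod (a * 2 + 1) 2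
  rw [hd] at hm
  unfold pvF
  rw [hd, show PySem.Int.mod (a * 2 + 1) 2 = 1 by omega]
  norm_num

lemma pvRange13 : PySem.List.pyRange 1 3 1 = [1, 2] := by decide

lemma pvFlatMapCongr {α β : Type} (l : List α) (f g : α → List β)
    (h : ∀ x ∈ l, f x = g x) : l.flatMap f = l.flatMap g := by
  induction l with
  | nil => rfl
  | cons a t ih =>
    simp only [List.flatMap_cons, h a (by simp), ih (fun x hx => h x (by simp [hx]))]

lemma pvStepA (ai si af sf ano : Int) (ed : List (Int × Int)) :
    (PySem.List.pyRange 1 3 1).foldl (fun ed semestre =>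
        if ano = ai ∧ semestre < si then ed
        else if ano = af ∧ semestre > sf then ed
        else ed ++ [(ano, semestre)]) ed
      = ed ++ pvYr ai si af sf ano := by
  rw [pvRange13]
  simp only [List.foldl, pvYr]
  split_ifs <;> simp

lemma pvLoopA (ai si af sf : Int) (l : List Int) (acc : List (Int × Int)) :
    l.foldl (fun edicoes ano =>
      (PySem.List.pyRange 1 3 1).foldl (fun ed semestre =>
        if ano = ai ∧ semestre < si then ed
        else if ano = af ∧ semestre > sf then ed
        else ed ++ [(ano, semestre)]) edicoes) acc
      = acc ++ l.flatMap (pvYr ai si af sf) := by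
  induction l generalizing acc with
  | nil => simp
  | cons a t ih =>
    rw [List.foldl_cons, pvStepA, ih, List.flatMap_cons, List.append_assoc]

lemma pvA_eq (ai si af sf : Int) :
    gerar_edicoes ai si af sf
      = (PySem.List.pyRange ai (af + 1) 1).flatMap (pvYr ai si af sf) := by
  unfold gerar_edicoes
  rw [pvLoopA]
  simp

/-- the even range [ai*2, af*2+2) splits into per-year pairs -/
lemma pvRangeSplit (ai : Int) : ∀ (n : ℕ) (af : Int), (af + 1 - ai).toNat = n →
    PySem.List.pyRange (ai * 2) (af * 2 + 2) 1
      = (PySem.List.pyRange ai (af + 1) 1).flatMap (fun a => [a * 2, a * 2 + 1]) := by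
  intro n
  induction n with
  | zero =>
    intro af htn
    rw [PySem.List.pyRange_one_eq_nil (by omega : af * 2 + 2 ≤ ai * 2),
        PySem.List.pyRange_one_eq_nil (by omega : af + 1 ≤ ai)]
    rfl
  | succ n ih =>
    intro af htn
    have hle : ai ≤ af := by omega
    rw [show af + 1 = af + 1 by rfl, PySem.List.pyRange_one_succ_right (by omega : ai ≤ af),
        List.flatMap_append,
        show af * 2 + 2 = (af * 2 + 1) + 1 by ring,
        PySem.List.pyRange_one_succ_right (by omega : ai * 2 ≤ af * 2 + 1),
        PySem.List.pyRange_one_succ_right (by omega : ai * 2 ≤ af * 2)]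
    have := ih (af - 1) (by omega)
    rw [show af - 1 + 1 = af by ring] at this
    rw [show (af - 1) * 2 + 2 = af * 2 by ring] at this
    rw [this]
    simp

lemma pvMapFilterFlatMap {α β γ : Type} (l : List α) (g : α → List β)
    (f : β → γ) (p : γ → Bool) :
    ((l.flatMap g).map f).filter p = l.flatMap (fun a => ((g a).map f).filter p) := by
  induction l with
  | nil => rfl
  | cons a t ih => simp [List.flatMap_cons, List.map_append, List.filter_append, ih]

/-- one year's pair, decoded and filtered by the lexicographic bounds, is A's per-year contribution -/
lemma pvYear (ai si af sf a : Int) (h1 : ai ≤ a) (h2 : a ≤ af) :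
    (([a * 2, a * 2 + 1].map pvF).filter
        (fun ed => pvLexLe (ai, si) ed && pvLexLe ed (af, sf)))
      = pvYr ai si af sf a := by
  simp only [List.map_cons, List.map_nil, pvF_even, pvF_odd]
  simp only [List.filter_cons, List.filter_nil, pvYr, pvLexLe, Bool.and_eq_true,
    Bool.or_eq_true, decide_eq_true_eq, beq_iff_eq]
  split_ifs <;> first | rfl | (exfalso; omega)

-- ===== VERDICT (by name: the statement is the Claim_ definition above) =====
theorem gerar_edicoes_spec : Claim_equal_gerar_edicoes := by
  intro ai si af sf _
  unfold Spec_gerar_edicoes gerar_edicoes_alt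
  rw [pvA_eq]
  simp only []
  rw [pvRangeSplit ai ((af + 1 - ai).toNat) af rfl, pvMapFilterFlatMap]
  apply Eq.symm
  apply pvFlatMapCongr
  intro a ha
  have := (PySem.List.mem_pyRange_one).mp ha
  exact pvYear ai si af sf a (by omega) (by omega)
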